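-- pv_equiv track=rewrite | github.com/taajik/Stego_Tool | steganographer.py | payload_pixels
-- ===== SOURCE A (Python) =====
-- import math
--
-- METADATA_SIZE = 4
--
-- def payload_pixels(width, height, payload_len):
--     """Generate the coordinates of payload-carrying pixels in the carrier
--     to be replaced by (or from which extract) the payload data.
--     """
--
--     # Calculate density of payload within carrier's pixels.
--     # Note: values are in number of pixels.
--     carrier_capacity = width*height - METADATA_SIZE
--     # Number of pixels requiered to store all of the payload data:
--     # Three units of data can be stord in a pixel (one in each subpixel (RGB)).
--     # Each unit of data is two bits.
--     data_size = math.ceil(payload_len*8 / 6)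
--     if data_size > carrier_capacity:
--         raise OverflowError("payload can't fit in this carrier file")
--
--     # Intervals of carrier pixels (to spread out the payload):
--     # Reserve one pixel for the first unit of data; and for the rest:
--     # 'steps' equals to the number of pixels that each
--     # unit of data occupies (one payload-carrying plus intervals).
--     steps = math.floor((carrier_capacity-1) / (data_size-1))
--     # Intervals of data pixels (to load the payload in multiple rounds):
--     ROUNDS = 2
--     round_steps = steps * ROUNDS
--
--     for r in range(ROUNDS):
--         # Stating value of 'column' determines which round
--         # of data pixels are getting filled.
--         column = METADATA_SIZE + r*steps
--         row = 0
--         while row < height:  # Till the end of carrier file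
--             # If 'column' is out of bound, go to the next row
--             # and continue from remainder of the interval.
--             row += column // width
--             column = column % width
--             # Generate coordinates of the data pixels.
--             if row < height and column < width:
--                 # c corresponds to the RGB subpixels.
--                 # So the same pixel coordinate is returned three times.
--                 for c in range(3):
--                     yield row, column, c
--             # Jump a whole step.
--             column += round_steps
-- ===== SOURCE B (Python) =====
-- import math
--
-- METADATA_SIZE = 4
--
-- def payload_pixels(width, height, payload_len):
--     """Generate the coordinates of payload-carrying pixels in the carrier
--     to be replaced by (or from which extract) the payload data.
--     """
--     # Same capacity/density prologue as A.
--     carrier_capacity = width*height - METADATA_SIZE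
--     data_size = math.ceil(payload_len*8 / 6)
--     if data_size > carrier_capacity:
--         raise OverflowError("payload can't fit in this carrier file")
--     steps = math.floor((carrier_capacity-1) / (data_size-1))
--
--     # All data pixels of both rounds together form ONE arithmetic progression
--     # of flat pixel indices: METADATA_SIZE + k*steps for k = 0, 1, 2, ...
--     # Round 0 is the even-k half and round 1 the odd-k half, so instead of
--     # running a per-round while-loop with (row, column) carry normalisation we
--     # materialise that single progression once and emit its even-indexed
--     # elements followed by its odd-indexed elements.
--     flats = list(range(METADATA_SIZE, width*height, steps))
--     for f in flats[0::2] + flats[1::2]: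
--         row, column = divmod(f, width)
--         for c in range(3):
--             yield row, column, c
-- ===== Notes on version B (the rewrite author's own statement) =====
-- stated objective: simpler
-- what changed: A runs one while-loop per round carrying a (row, column) pair that is re-normalised with // and % on every step; B observes that both rounds together are the single arithmetic progression METADATA_SIZE + k*steps of flat pixel indices, materialises it once with range(), and emits its even-indexed slice (round 0) followed by its odd-indexed slice (round 1), converting each flat index with one divmod.
-- outside the precondition, e.g. on payload_pixels(-1, -5, 0): A returns [], B raises ValueError; on payload_pixels(0, -1, -3): A returns [], B returns []
import Mathlib
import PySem

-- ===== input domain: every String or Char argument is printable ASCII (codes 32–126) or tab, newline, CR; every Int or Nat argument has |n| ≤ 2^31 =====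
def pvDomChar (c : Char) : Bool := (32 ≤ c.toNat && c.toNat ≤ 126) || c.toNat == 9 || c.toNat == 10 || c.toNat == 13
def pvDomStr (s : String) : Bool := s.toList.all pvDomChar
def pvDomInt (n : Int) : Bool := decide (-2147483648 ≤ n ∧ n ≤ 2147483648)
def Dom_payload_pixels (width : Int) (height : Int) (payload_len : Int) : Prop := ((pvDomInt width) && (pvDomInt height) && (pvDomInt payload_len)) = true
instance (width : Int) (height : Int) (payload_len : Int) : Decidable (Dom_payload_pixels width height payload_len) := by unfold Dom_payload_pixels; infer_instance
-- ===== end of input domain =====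

-- B replaces A's per-round (row, column) carry-normalising while-loops by materialising
-- the single arithmetic progression of flat pixel indices once and emitting its
-- even-indexed then odd-indexed elements (simpler decomposition, same cost).

-- ===== PORT A =====
-- Shared arithmetic helpers (both Pythons share the identical capacity/steps prologue):
-- Python's '/' on ints is IEEE-754 double division; 'math.floor' of it is emulated
-- bit-exactly for positive arguments by pvFloorDivFloat below (round the exact rational
-- a/b to 53 significant bits, nearest, ties to even, then floor).

-- round num/den (den > 0) to the nearest integer, ties to even
def pvRoundEven (num den : Nat) : Nat :=
  if 2 * (num % den) > den ∨ (2 * (num % den) = den ∧ (num / den) % 2 = 1)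
  then num / den + 1 else num / den

-- B * 2^e ≤ A, for a possibly negative exponent e
def pvScaledLe (B A : Nat) (e : Int) : Bool :=
  if 0 ≤ e then decide (B * 2 ^ e.toNat ≤ A) else decide (B ≤ A * 2 ^ (-e).toNat)

-- e = floor(log2(A/B)) for A, B ≥ 1
def pvFloatE (A B : Nat) : Int :=
  if pvScaledLe B A ((Nat.log2 A : Int) - (Nat.log2 B : Int))
  then (Nat.log2 A : Int) - (Nat.log2 B : Int)
  else (Nat.log2 A : Int) - (Nat.log2 B : Int) - 1

-- the 53-bit significand of the double nearest to A/B, given its exponent e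
def pvFloatMant (A B : Nat) (e : Int) : Nat :=
  if 0 ≤ 52 - e then pvRoundEven (A * 2 ^ (52 - e).toNat) B
  else pvRoundEven A (B * 2 ^ (e - 52).toNat)

-- floor of the IEEE double nearest to A/B (A, B ≥ 1)
def pvFloatCore (A B : Nat) : Int :=
  if 0 ≤ pvFloatE A B - 52
  then ((pvFloatMant A B (pvFloatE A B) * 2 ^ (pvFloatE A B - 52).toNat : Nat) : Int)
  else ((pvFloatMant A B (pvFloatE A B) / 2 ^ (52 - pvFloatE A B).toNat : Nat) : Int)

-- math.floor(a / b) with Python float division; exact for 0 < b ≤ a (the only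
-- arguments the admitted inputs reach); elsewhere a plain floor-division placeholder
def pvFloorDivFloat (a b : Int) : Int :=
  if 0 < a ∧ 0 < b then pvFloatCore a.toNat b.toNat else Int.fdiv a b

-- A's while-loop over the (row, column) state; fuel only makes the recursion total,
-- the admitted inputs exit through the 'row < height' guard before it runs out
def pvLoopA (width height round_steps : Int) : Int → Int → Nat → List (Int × Int × Int)
  | _, _, 0 => []
  | row, column, fuel+1 =>
    if row < height then
      let row1 := row + PySem.Int.floordiv column width
      let col1 := PySem.Int.mod column width
      (if row1 < height ∧ col1 < width then
        (PySem.List.pyRange 0 3 1).map (fun c => (row1, col1, c))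
      else []) ++ pvLoopA width height round_steps row1 (col1 + round_steps) fuel
    else []

def payload_pixels (width : Int) (height : Int) (payload_len : Int) : List (Int × Int × Int) :=
  let carrier_capacity := width * height - 4          -- METADATA_SIZE = 4
  -- math.ceil(payload_len*8/6): the float computation is exact for |payload_len| ≤ 2^31,
  -- where it equals the integer ceiling below
  let data_size := PySem.Int.floordiv (8 * payload_len + 5) 6
  if data_size > carrier_capacity then []             -- OverflowError: excluded by Pre_
  else
    let steps := pvFloorDivFloat (carrier_capacity - 1) (data_size - 1)
    let round_steps := steps * 2                      -- ROUNDS = 2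
    (PySem.List.pyRange 0 2 1).flatMap (fun r =>
      pvLoopA width height round_steps 0 (4 + r * steps) ((width * height).toNat + 1))

-- ===== PORT B =====
-- xs[0::2]: the even-indexed elements of xs (exact for Python's step-2 slice from 0;
-- xs[1::2] is then pvEveryOther xs.tail); PySem has no stepped slice, so ported by hand
def pvEveryOther {α : Type} : List α → List α
  | [] => []
  | x :: xs => x :: pvEveryOther (xs.drop 1)
termination_by xs => xs.length
decreasing_by simp

def payload_pixels_alt (width : Int) (height : Int) (payload_len : Int) : List (Int × Int × Int) :=
  let carrier_capacity := width * height - 4          -- METADATA_SIZE = 4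
  let data_size := PySem.Int.floordiv (8 * payload_len + 5) 6   -- see the comment in PORT A
  if data_size > carrier_capacity then []             -- OverflowError: excluded by Pre_
  else
    let steps := pvFloorDivFloat (carrier_capacity - 1) (data_size - 1)
    let flats := PySem.List.pyRange 4 (width * height) steps
    (pvEveryOther flats ++ pvEveryOther flats.tail).flatMap (fun f =>
      (PySem.List.pyRange 0 3 1).map (fun c =>
        (PySem.Int.floordiv f width, PySem.Int.mod f width, c)))

-- ===== PRECONDITION & SPEC =====
-- Pre_ excludes the inputs on which A raises OverflowError (payload bigger than the
-- carrier) or ZeroDivisionError (width 0 reached in the loop), hangs forever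
-- (non-positive payload_len with positive dimensions), and the meaningless
-- non-positive-dimension corner, where A returns [] only by accident of its row
-- guard (B returns [] there too, except for width 0, where B raises).
def Pre_payload_pixels (width : Int) (height : Int) (payload_len : Int) : Prop :=
  1 ≤ width ∧ 1 ≤ payload_len ∧ PySem.Int.floordiv (8 * payload_len + 5) 6 ≤ width * height - 4
instance (width : Int) (height : Int) (payload_len : Int) : Decidable (Pre_payload_pixels width height payload_len) := by unfold Pre_payload_pixels; infer_instance
def pvWitness_payload_pixels : Int × Int × Int := (3, 2, 1)
def Spec_payload_pixels (width : Int) (height : Int) (payload_len : Int) (out : List (Int × Int × Int)) : Prop := out = payload_pixels_alt width height payload_len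
instance (width : Int) (height : Int) (payload_len : Int) (out : List (Int × Int × Int)) : Decidable (Spec_payload_pixels width height payload_len out) := by unfold Spec_payload_pixels; infer_instance

-- ===== CLAIM (what is proved, stated in full; the proofs are below) =====
def Claim_equal_payload_pixels : Prop := ∀ (width : Int) (height : Int) (payload_len : Int), Dom_payload_pixels width height payload_len → Pre_payload_pixels width height payload_len → Spec_payload_pixels width height payload_len (payload_pixels width height payload_len)

-- ===== LEMMAS AND PROOFS =====

lemma pvRoundEven_ge (num den : Nat) : num / den ≤ pvRoundEven num den := by
  unfold pvRoundEven; split <;> omega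

lemma pvLog2_le_log2 {A B : Nat} (hB : 0 < B) (h : B ≤ A) : Nat.log2 B ≤ Nat.log2 A := by
  have h1 : 2 ^ Nat.log2 B ≤ B := Nat.log2_self_le (by omega)
  have h2 : A < 2 ^ (Nat.log2 A + 1) := Nat.lt_log2_self
  have : (2:Nat) ^ Nat.log2 B < 2 ^ (Nat.log2 A + 1) := by omega
  have := (Nat.pow_lt_pow_iff_right (by norm_num : 1 < 2)).1 this
  omega

lemma pvFloatE_nonneg (A B : Nat) (hB : 0 < B) (hBA : B ≤ A) : 0 ≤ pvFloatE A B := by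
  have hmono := pvLog2_le_log2 hB hBA
  unfold pvFloatE
  set e0 : Int := (Nat.log2 A : Int) - (Nat.log2 B : Int) with he0def
  have he0 : 0 ≤ e0 := by omega
  by_cases hsc : pvScaledLe B A e0 = true
  · rw [if_pos hsc]; exact he0
  · rw [if_neg hsc]
    rcases eq_or_lt_of_le he0 with h0 | h0
    · exfalso
      apply hsc
      unfold pvScaledLe
      rw [← h0, if_pos le_rfl]
      simpa using hBA
    · omega

lemma pvFloatE_scaled (A B : Nat) (hB : 0 < B) (hBA : B ≤ A) :
    B * 2 ^ (pvFloatE A B).toNat ≤ A := by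
  have hA : 0 < A := lt_of_lt_of_le hB hBA
  have hmono := pvLog2_le_log2 hB hBA
  unfold pvFloatE
  set la := Nat.log2 A with hla
  set lb := Nat.log2 B with hlb
  by_cases hsc : pvScaledLe B A ((la : Int) - (lb : Int)) = true
  · rw [if_pos hsc]
    unfold pvScaledLe at hsc
    rw [if_pos (by omega : (0:Int) ≤ (la : Int) - (lb : Int))] at hsc
    simpa using hsc
  · rw [if_neg hsc]
    -- here la > lb: at e0 = 0 the test B * 1 ≤ A is true
    have hlt : lb < la := by
      rcases Nat.lt_or_ge lb la with h | h
      · exact h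
      · exfalso
        have he : (la : Int) - (lb : Int) = 0 := by omega
        apply hsc
        unfold pvScaledLe
        rw [he, if_pos le_rfl]
        simpa using hBA
    have h1 : B < 2 ^ (lb + 1) := Nat.lt_log2_self
    have h2 : 2 ^ la ≤ A := Nat.log2_self_le (by omega)
    have htn : (((la : Int) - (lb : Int) - 1)).toNat = la - lb - 1 := by omega
    rw [htn]
    have hposk : 0 < 2 ^ (la - lb - 1) := by positivity
    have h3 : B * 2 ^ (la - lb - 1) < 2 ^ (lb + 1) * 2 ^ (la - lb - 1) :=
      (Nat.mul_lt_mul_right hposk).mpr h1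
    have h4 : 2 ^ (lb + 1) * 2 ^ (la - lb - 1) = 2 ^ la := by
      rw [← pow_add]; congr 1; omega
    omega

lemma pvFloatCore_pos (A B : Nat) (hB : 0 < B) (hBA : B ≤ A) : 1 ≤ pvFloatCore A B := by
  have he0 := pvFloatE_nonneg A B hB hBA
  have hsc := pvFloatE_scaled A B hB hBA
  unfold pvFloatCore
  set e := pvFloatE A B with hedef
  have hmant : 2 ^ 52 ≤ pvFloatMant A B e := by
    unfold pvFloatMant
    by_cases h52 : (0:Int) ≤ 52 - e
    · rw [if_pos h52]
      have hexp : e.toNat + (52 - e).toNat = 52 := by omega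
      have hnum : 2 ^ 52 * B ≤ A * 2 ^ (52 - e).toNat := by
        calc 2 ^ 52 * B = B * 2 ^ e.toNat * 2 ^ (52 - e).toNat := by
              rw [mul_assoc, ← pow_add, hexp]; ring
          _ ≤ A * 2 ^ (52 - e).toNat := Nat.mul_le_mul_right _ hsc
      exact le_trans ((Nat.le_div_iff_mul_le hB).2 hnum) (pvRoundEven_ge _ _)
    · rw [if_neg h52]
      have hexp : (e - 52).toNat + 52 = e.toNat := by omega
      have hnum : 2 ^ 52 * (B * 2 ^ (e - 52).toNat) ≤ A := by
        calc 2 ^ 52 * (B * 2 ^ (e - 52).toNat) = B * 2 ^ e.toNat := by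
              rw [← hexp, pow_add]; ring
          _ ≤ A := hsc
      have hden : 0 < B * 2 ^ (e - 52).toNat := by positivity
      exact le_trans ((Nat.le_div_iff_mul_le hden).2 hnum) (pvRoundEven_ge _ _)
  have h1 : 1 ≤ pvFloatMant A B e := le_trans (by norm_num) hmant
  by_cases hge : (0:Int) ≤ e - 52
  · rw [if_pos hge]
    have : 1 ≤ pvFloatMant A B e * 2 ^ (e - 52).toNat :=
      le_trans h1 (Nat.le_mul_of_pos_right _ (by positivity))
    exact_mod_cast this
  · rw [if_neg hge]
    have hple : (2:Nat) ^ (52 - e).toNat ≤ 2 ^ 52 :=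
      Nat.pow_le_pow_right (by norm_num) (by omega)
    have : 1 ≤ pvFloatMant A B e / 2 ^ (52 - e).toNat :=
      (Nat.one_le_div_iff (by positivity)).2 (by omega)
    exact_mod_cast this

lemma pvFloorDivFloat_pos (a b : Int) (hb : 0 < b) (hba : b ≤ a) : 1 ≤ pvFloorDivFloat a b := by
  unfold pvFloorDivFloat
  rw [if_pos ⟨lt_of_lt_of_le hb hba, hb⟩]
  exact pvFloatCore_pos _ _ (by omega) (by omega)

lemma pvRange_pos_nil (a b s : Int) (hs : 0 < s) (h : b ≤ a) :
    PySem.List.pyRange a b s = [] := by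
  rw [PySem.List.pyRange_of_pos a b hs, if_neg (by omega)]
  simp

lemma pvRange_pos_cons (a b s : Int) (hs : 0 < s) (h : a < b) :
    PySem.List.pyRange a b s = a :: PySem.List.pyRange (a + s) b s := by
  rw [PySem.List.pyRange_of_pos a b hs, PySem.List.pyRange_of_pos (a + s) b hs, if_pos h]
  have hkey : (b - a + s - 1) / s = (b - a - 1) / s + 1 := by
    have h1 : b - a + s - 1 = (b - a - 1) + s * 1 := by ring
    rw [h1, Int.add_mul_ediv_left _ _ (by omega : s ≠ 0)]
  have hq0 : 0 ≤ (b - a - 1) / s := Int.ediv_nonneg (by omega) (by omega)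
  have hcnt : (b - (a + s) + s - 1) = b - a - 1 := by ring
  have hrhs : (if a + s < b then ((b - (a + s) + s - 1) / s).toNat else 0)
      = ((b - a - 1) / s).toNat := by
    by_cases h2 : a + s < b
    · rw [if_pos h2, hcnt]
    · rw [if_neg h2]
      have : (b - a - 1) / s = 0 := Int.ediv_eq_zero_of_lt (by omega) (by omega)
      rw [this]; rfl
  rw [hrhs, hkey]
  have h4 : ((b - a - 1) / s + 1).toNat = ((b - a - 1) / s).toNat + 1 := by omega
  rw [h4, List.range_succ_eq_map, List.map_cons, List.map_map]
  congr 1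
  · push_cast; ring
  · apply List.map_congr_left
    intro k _
    simp only [Function.comp_apply, Nat.succ_eq_add_one]
    push_cast
    ring

lemma pvLoopA_stop (W H RS row column : Int) (fuel : Nat) (h : H ≤ row) :
    pvLoopA W H RS row column fuel = [] := by
  cases fuel with
  | zero => rfl
  | succ n => simp only [pvLoopA]; rw [if_neg (by omega)]

lemma pvLoopA_eq (W H RS : Int) (hW : 0 < W) (hRS : 0 < RS) :
    ∀ (fuel : Nat) (row column : Int), 0 ≤ row → 0 ≤ column →
      (H * W - (row * W + column)).toNat < fuel →
      pvLoopA W H RS row column fuel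
        = (PySem.List.pyRange (row * W + column) (H * W) RS).flatMap
            (fun flat => (PySem.List.pyRange 0 3 1).map
              (fun c => (PySem.Int.floordiv flat W, PySem.Int.mod flat W, c))) := by
  intro fuel
  induction fuel with
  | zero => intro row column _ _ hf; exact absurd hf (Nat.not_lt_zero _)
  | succ n ih =>
    intro row column hr hc hf
    by_cases hrow : row < H
    · have hdivadd : PySem.Int.floordiv (row * W + column) W
          = row + PySem.Int.floordiv column W := by
        rw [PySem.Int.floordiv_eq_ediv_of_pos hW, PySem.Int.floordiv_eq_ediv_of_pos hW]
        have h1 : row * W + column = column + W * row := by ring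
        rw [h1, Int.add_mul_ediv_left _ _ (by omega : W ≠ 0)]
        ring
      have hmodadd : PySem.Int.mod (row * W + column) W = PySem.Int.mod column W := by
        rw [PySem.Int.mod_eq_emod_of_pos hW, PySem.Int.mod_eq_emod_of_pos hW]
        have h1 : row * W + column = column + W * row := by ring
        rw [h1, Int.add_mul_emod_self_left]
      have hsum := PySem.Int.floordiv_mul_add_mod (row * W + column) W
      rw [hdivadd, hmodadd] at hsum
      have hflatpos : 0 ≤ row * W + column := by
        have : 0 ≤ row * W := mul_nonneg hr hW.le
        linarith
      have hmd0 : 0 ≤ PySem.Int.mod column W := PySem.Int.mod_nonneg column hW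
      by_cases hflat : row * W + column < H * W
      · have hrow1 : row + PySem.Int.floordiv column W < H := by
          rw [← hdivadd]
          exact (PySem.Int.floordiv_lt_iff_lt_mul hW).2 hflat
        have hcol1 : PySem.Int.mod column W < W := PySem.Int.mod_lt column hW
        rw [pvRange_pos_cons _ _ _ hRS hflat, List.flatMap_cons]
        simp only [pvLoopA]
        rw [if_pos hrow, if_pos ⟨hrow1, hcol1⟩]
        congr 1
        · rw [hdivadd, hmodadd]
        · have hfd0 : 0 ≤ row + PySem.Int.floordiv column W := by
            rw [← hdivadd, PySem.Int.floordiv_eq_ediv_of_pos hW]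
            exact Int.ediv_nonneg hflatpos hW.le
          have hflat' : (row + PySem.Int.floordiv column W) * W
              + (PySem.Int.mod column W + RS) = (row * W + column) + RS := by
            linarith [hsum]
          have hfuel : (H * W - ((row + PySem.Int.floordiv column W) * W
              + (PySem.Int.mod column W + RS))).toNat < n := by
            rw [hflat']
            have h1 : 0 < H * W - (row * W + column) := by linarith
            have h2 : H * W - (row * W + column + RS)
                = (H * W - (row * W + column)) - RS := by ring
            rw [h2]
            revert hf h1
            generalize H * W - (row * W + column) = X
            intro hf h1
            omega
          have htail := ih (row + PySem.Int.floordiv column W)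
            (PySem.Int.mod column W + RS) hfd0 (by linarith) hfuel
          rw [hflat'] at htail
          exact htail
      · have hge : H ≤ row + PySem.Int.floordiv column W := by
          rw [← hdivadd]
          exact (PySem.Int.le_floordiv_iff_mul_le hW).2 (by linarith)
        simp only [pvLoopA]
        rw [if_pos hrow, if_neg (by rintro ⟨h1, -⟩; omega)]
        rw [pvRange_pos_nil _ _ _ hRS (by linarith)]
        rw [pvLoopA_stop _ _ _ _ _ _ hge]
        simp
    · have hge : H * W ≤ row * W + column := by
        have h1 : H * W ≤ row * W := mul_le_mul_of_nonneg_right (by omega) hW.le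
        linarith
      simp only [pvLoopA]
      rw [if_neg hrow, pvRange_pos_nil _ _ _ hRS hge]
      simp

lemma pvRound_eq (W H RS : Int) (hW : 0 < W) (hRS : 0 < RS) (col : Int) (hc : 0 ≤ col) :
    pvLoopA W H RS 0 col ((W * H).toNat + 1)
      = (PySem.List.pyRange col (W * H) RS).flatMap
          (fun flat => (PySem.List.pyRange 0 3 1).map
            (fun c => (PySem.Int.floordiv flat W, PySem.Int.mod flat W, c))) := by
  have h0 : (0:Int) * W + col = col := by ring
  have hfuel : (H * W - ((0:Int) * W + col)).toNat < (W * H).toNat + 1 := by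
    rw [h0, mul_comm H W]
    generalize W * H = M
    omega
  have h := pvLoopA_eq W H RS hW hRS ((W * H).toNat + 1) 0 col le_rfl hc hfuel
  rw [h0, mul_comm H W] at h
  exact h

-- B side: the tail of a positive-step range starts one step later
lemma pvRange_pos_tail (a b s : Int) (hs : 0 < s) :
    (PySem.List.pyRange a b s).tail = PySem.List.pyRange (a + s) b s := by
  by_cases h : a < b
  · rw [pvRange_pos_cons _ _ _ hs h]; rfl
  · rw [pvRange_pos_nil _ _ _ hs (by omega), pvRange_pos_nil _ _ _ hs (by omega)]; rfl

-- the even-indexed elements of a step-s range form the step-2s range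
lemma pvEveryOther_pyRange (s : Int) (hs : 0 < s) :
    ∀ (n : Nat) (a b : Int), (b - a).toNat ≤ n →
      pvEveryOther (PySem.List.pyRange a b s) = PySem.List.pyRange a b (2 * s) := by
  intro n
  induction n with
  | zero =>
    intro a b hn
    rw [pvRange_pos_nil _ _ _ hs (by omega), pvRange_pos_nil _ _ _ (by omega) (by omega)]
    simp [pvEveryOther]
  | succ m ih =>
    intro a b hn
    by_cases h : a < b
    · rw [pvRange_pos_cons _ _ _ hs h]
      simp only [pvEveryOther, List.drop_one]
      rw [pvRange_pos_tail _ _ _ hs]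
      rw [ih (a + s + s) b (by omega)]
      rw [pvRange_pos_cons a b (2 * s) (by omega) h]
      congr 2
      ring
    · rw [pvRange_pos_nil _ _ _ hs (by omega), pvRange_pos_nil _ _ _ (by omega) (by omega)]
      simp [pvEveryOther]

-- ===== VERDICT (by name: the statement is the Claim_ definition above) =====
theorem payload_pixels_spec : Claim_equal_payload_pixels := by
  intro w h p _ hpre
  obtain ⟨hw, hp, hcap⟩ := hpre
  unfold Spec_payload_pixels payload_pixels payload_pixels_alt
  have hds : PySem.Int.floordiv (8 * p + 5) 6 = (8 * p + 5) / 6 :=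
    PySem.Int.floordiv_eq_ediv_of_pos (by norm_num)
  rw [hds] at hcap
  have hds2 : 2 ≤ (8 * p + 5) / 6 := by omega
  simp only [hds]
  rw [if_neg (by omega : ¬((8 * p + 5) / 6 > w * h - 4)), if_neg (by omega : ¬((8 * p + 5) / 6 > w * h - 4))]
  have hsteps : 1 ≤ pvFloorDivFloat (w * h - 4 - 1) ((8 * p + 5) / 6 - 1) :=
    pvFloorDivFloat_pos _ _ (by omega) (by linarith)
  set S := pvFloorDivFloat (w * h - 4 - 1) ((8 * p + 5) / 6 - 1) with hS
  have hrange : PySem.List.pyRange 0 2 1 = [0, 1] := by decide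
  rw [hrange]
  simp only [List.flatMap_cons, List.flatMap_nil, List.append_nil]
  rw [pvRound_eq w h (S * 2) (by omega) (by linarith) (4 + 0 * S) (by linarith),
      pvRound_eq w h (S * 2) (by omega) (by linarith) (4 + 1 * S) (by linarith)]
  rw [List.flatMap_append]
  rw [pvRange_pos_tail 4 (w * h) S hsteps]
  rw [pvEveryOther_pyRange S hsteps (w * h - 4).toNat 4 (w * h) (by omega),
      pvEveryOther_pyRange S hsteps (w * h - (4 + S)).toNat (4 + S) (w * h) (by omega)]
  have e1 : (4:Int) + 0 * S = 4 := by ring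
  have e2 : (4:Int) + 1 * S = 4 + S := by ring
  have e3 : S * 2 = 2 * S := by ring
  rw [e1, e2, e3]
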